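-- pv_equiv track=rewrite | github.com/pianowow/projecteuler | 191/191.py | f
-- ===== SOURCE A (Python) =====
-- def f(n, a, l):
--     if n == 0:
--         return 1
--     # 'O'
--     ret = f(n - 1, 0, l)
--     # 'L'
--     if l == 0:
--         ret += f(n - 1, 0, 1)
--     # 'A'
--     if a < 2:
--         ret += f(n - 1, a + 1, l)
--     return ret
-- ===== SOURCE B (Python) =====
-- def f(n, a, l):
--     # Bottom-up linear DP: six counters cxy = number of valid length-j suffixes
--     # right after a run of x consecutive A's (y = 1 iff the single L is spent),
--     # advanced from j = 0 upward; a valid string is either all A's, or a run of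
--     # n-1-j initial A's followed by 'O' (or by 'L' when l == 0) and a suffix.
--     cap = 2 - a if a < 2 else 0          # longest run of A's the string may start with
--     total = 1 if n <= cap else 0         # the all-A string (covers n == 0)
--     c00 = c01 = c10 = c11 = c20 = c21 = 1
--     for j in range(n):
--         if n - 1 - cap <= j:
--             total += c00 if l == 0 else c01
--             if l == 0:
--                 total += c01
--         c00, c01, c10, c11, c20, c21 = (c00 + c01 + c10, c01 + c11,
--                                         c00 + c01 + c20, c01 + c21,
--                                         c00 + c01, c01)
--     return total
-- ===== Notes on version B (the rewrite author's own statement) =====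
-- stated objective: faster
-- what changed: replaces the exponential three-way recursion by a bottom-up six-counter DP over suffix lengths combined with a run decomposition (all-A's, or k initial A's then O/L) for the arbitrary starting state (a, l); intended as faster: a timing run saw A time out at n=16 where B returned, so no ratio was measurable
import Mathlib
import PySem

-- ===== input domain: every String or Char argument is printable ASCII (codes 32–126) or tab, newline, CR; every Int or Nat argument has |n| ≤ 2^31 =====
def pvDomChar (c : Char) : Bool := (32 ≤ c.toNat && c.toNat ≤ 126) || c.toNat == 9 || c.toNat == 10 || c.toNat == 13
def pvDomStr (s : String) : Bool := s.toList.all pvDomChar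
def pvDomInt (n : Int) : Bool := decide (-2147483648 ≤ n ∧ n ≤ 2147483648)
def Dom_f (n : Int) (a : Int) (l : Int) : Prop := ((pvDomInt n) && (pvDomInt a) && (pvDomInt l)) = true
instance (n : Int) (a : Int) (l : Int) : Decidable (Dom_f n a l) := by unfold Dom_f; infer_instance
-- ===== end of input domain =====

-- B replaces A's exponential recursion by a bottom-up six-counter DP plus a run
-- decomposition for the arbitrary starting state (a, l); intended as faster
-- (timing: A timed out at n = 16 where B returned, so no ratio was measurable).

-- ===== PORT A =====
-- A recurses on n down to 0; for n < 0 the Python recursion never terminates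
-- (RecursionError), so those inputs are outside Pre_f and the port uses n.toNat.
def fNat : Nat → Int → Int → Int
  | 0, _, _ => 1
  | m + 1, a, l =>
    let ret := fNat m 0 l
    let ret := if l == 0 then ret + fNat m 0 1 else ret
    if a < 2 then ret + fNat m (a + 1) l else ret

def f (n : Int) (a : Int) (l : Int) : Int := fNat n.toNat a l

-- ===== PORT B =====
-- the body of B's 'for j in range(n)' loop over (c00, c01, c10, c11, c20, c21, total)
def fAltBody (n : Int) (cap : Int) (l : Int)
    (st : Int × Int × Int × Int × Int × Int × Int) (j : Int) :
    Int × Int × Int × Int × Int × Int × Int :=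
  match st with
  | (c00, c01, c10, c11, c20, c21, total) =>
    let total := if n - 1 - cap ≤ j then
        total + (if l == 0 then c00 else c01) + (if l == 0 then c01 else 0)
      else total
    (c00 + c01 + c10, c01 + c11, c00 + c01 + c20, c01 + c21, c00 + c01, c01, total)

def f_alt (n : Int) (a : Int) (l : Int) : Int :=
  let cap := if a < 2 then 2 - a else 0
  let st := (PySem.List.pyRange 0 n 1).foldl (fAltBody n cap l)
      (1, 1, 1, 1, 1, 1, if n ≤ cap then (1 : Int) else 0)
  st.2.2.2.2.2.2

-- ===== PRECONDITION & SPEC =====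
-- Pre_f excludes n < 0, where A recurses without bound (Python RecursionError).
def Pre_f (n : Int) (a : Int) (l : Int) : Prop := 0 ≤ n
instance (n : Int) (a : Int) (l : Int) : Decidable (Pre_f n a l) := by unfold Pre_f; infer_instance
def pvWitness_f : Int × Int × Int := (6, 0, 0)

def Spec_f (n : Int) (a : Int) (l : Int) (out : Int) : Prop := out = f_alt n a l
instance (n : Int) (a : Int) (l : Int) (out : Int) : Decidable (Spec_f n a l out) := by unfold Spec_f; infer_instance

-- ===== CLAIM (what is proved, stated in full; the proofs are below) =====
def Claim_equal_f : Prop := ∀ (n : Int) (a : Int) (l : Int), Dom_f n a l → Pre_f n a l → Spec_f n a l (f n a l)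

-- ===== LEMMAS AND PROOFS =====

-- cap of B, as a named helper for the proofs (definitionally B's expression)
def fCap (a : Int) : Int := if a < 2 then 2 - a else 0

theorem fCap_nonneg (a : Int) : 0 ≤ fCap a := by
  unfold fCap; split <;> omega

-- the contribution of splitting the string at a length-j suffix, in B's shape
def fTail (l : Int) (j : Nat) : Int :=
  (if l == 0 then fNat j 0 0 else fNat j 0 1) + (if l == 0 then fNat j 0 1 else 0)

-- Σ_{j < m, lo ≤ j} fTail l j
def fTailSum (l : Int) (lo : Int) : Nat → Int
  | 0 => 0
  | j + 1 => fTailSum l lo j + (if lo ≤ (j : Int) then fTail l j else 0)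

-- the l argument is only tested against 0, so any nonzero l behaves like 1
theorem fNat_l_ne_zero : ∀ (m : Nat) (x l : Int), l ≠ 0 → fNat m x l = fNat m x 1 := by
  intro m
  induction m with
  | zero => intro x l _; rfl
  | succ m ih =>
    intro x l hl
    have hl' : (l == 0) = false := by simp [hl]
    simp only [fNat, hl', Bool.false_eq_true, if_false]
    have h0 := ih 0 l hl
    have h1 := ih (x + 1) l hl
    split <;> simp [h0, h1]

theorem fTail_eq (l : Int) (m : Nat) :
    fNat m 0 l + (if l == 0 then fNat m 0 1 else 0) = fTail l m := by
  by_cases hl : l = 0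
  · subst hl; simp [fTail]
  · simp [fTail, hl, fNat_l_ne_zero m 0 l hl]

theorem fTailSum_zero_of_le (l lo : Int) : ∀ (m : Nat), (m : Int) ≤ lo → fTailSum l lo m = 0 := by
  intro m
  induction m with
  | zero => intro _; rfl
  | succ m ih =>
    intro h
    have h1 : ¬ lo ≤ (m : Int) := by push_cast at h ⊢; omega
    have h2 : (m : Int) ≤ lo := by push_cast at h ⊢; omega
    simp only [fTailSum, ih h2, h1, if_false]
    omega

-- run decomposition of A's recursion: all-A's, or k = m-1-j initial A's then O/L
theorem fNat_decomp : ∀ (m : Nat) (a l : Int),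
    fNat m a l = (if (m : Int) ≤ fCap a then 1 else 0)
      + fTailSum l ((m : Int) - 1 - fCap a) m := by
  intro m
  induction m with
  | zero =>
    intro a l
    have h := fCap_nonneg a
    simp only [fTailSum, Nat.cast_zero]
    rw [if_pos (by omega)]
    norm_num [fNat]
  | succ m ih =>
    intro a l
    have hcap := fCap_nonneg a
    have hsum : fTailSum l ((m + 1 : Nat) - 1 - fCap a) (m + 1)
        = fTailSum l ((m : Int) - fCap a) m + fTail l m := by
      have hlo : ((m + 1 : Nat) : Int) - 1 - fCap a = (m : Int) - fCap a := by push_cast; ring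
      rw [hlo]
      simp only [fTailSum]
      rw [if_pos (by omega)]
    rw [hsum]
    by_cases ha : a < 2
    · have hcap' : fCap (a + 1) = fCap a - 1 := by
        unfold fCap; split_ifs <;> omega
      have hstep : fNat (m + 1) a l
          = (fNat m 0 l + (if l == 0 then fNat m 0 1 else 0)) + fNat m (a + 1) l := by
        simp only [fNat, ha, if_true]
        split <;> ring
      rw [hstep, fTail_eq, ih (a + 1) l, hcap']
      have hind : (if ((m + 1 : Nat) : Int) ≤ fCap a then (1 : Int) else 0)
          = (if (m : Int) ≤ fCap a - 1 then 1 else 0) := by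
        split_ifs with h1 h2 <;> push_cast at * <;> omega
      have hlo' : (m : Int) - 1 - (fCap a - 1) = (m : Int) - fCap a := by ring
      rw [hind, hlo']
      ring
    · have hcap0 : fCap a = 0 := by unfold fCap; simp [ha]
      have hstep : fNat (m + 1) a l
          = fNat m 0 l + (if l == 0 then fNat m 0 1 else 0) := by
        simp only [fNat, ha, if_false]
        split <;> ring
      rw [hstep, fTail_eq, hcap0]
      rw [if_neg (by push_cast; omega)]
      rw [fTailSum_zero_of_le l ((m : Int) - 0) m (by omega)]
      ring
-- B's loop invariant: after j = 0 .. m-1 the six counters hold the length-m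
-- suffix counts and total has accumulated the guarded tail contributions.
theorem fAlt_loop : ∀ (m : Nat) (n cap l base : Int),
    (PySem.List.pyRange 0 (m : Int) 1).foldl (fAltBody n cap l) (1, 1, 1, 1, 1, 1, base)
      = (fNat m 0 0, fNat m 0 1, fNat m 1 0, fNat m 1 1, fNat m 2 0, fNat m 2 1,
         base + fTailSum l (n - 1 - cap) m) := by
  intro m
  induction m with
  | zero =>
    intro n cap l base
    simp [fTailSum, fNat]
  | succ m ih =>
    intro n cap l base
    have hrange : PySem.List.pyRange 0 ((m + 1 : Nat) : Int) 1
        = PySem.List.pyRange 0 (m : Int) 1 ++ [(m : Int)] := by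
      have := PySem.List.pyRange_one_succ_right (a := 0) (b := (m : Int)) (by omega)
      push_cast
      push_cast at this
      rw [this]
    rw [hrange, List.foldl_append, ih]
    simp only [List.foldl_cons, List.foldl_nil, fAltBody]
    have e00 : fNat m 0 0 + fNat m 0 1 + fNat m 1 0 = fNat (m + 1) 0 0 := by
      simp [fNat]
    have e01 : fNat m 0 1 + fNat m 1 1 = fNat (m + 1) 0 1 := by
      simp [fNat]
    have e10 : fNat m 0 0 + fNat m 0 1 + fNat m 2 0 = fNat (m + 1) 1 0 := by
      simp [fNat]
    have e11 : fNat m 0 1 + fNat m 2 1 = fNat (m + 1) 1 1 := by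
      simp [fNat]
    have e20 : fNat m 0 0 + fNat m 0 1 = fNat (m + 1) 2 0 := by
      norm_num [fNat]
    have e21 : fNat m 0 1 = fNat (m + 1) 2 1 := by
      norm_num [fNat]
    have etot : (if n - 1 - cap ≤ (m : Int) then
          base + fTailSum l (n - 1 - cap) m + (if l == 0 then fNat m 0 0 else fNat m 0 1)
            + (if l == 0 then fNat m 0 1 else 0)
        else base + fTailSum l (n - 1 - cap) m)
        = base + fTailSum l (n - 1 - cap) (m + 1) := by
      simp only [fTailSum, fTail]
      split <;> ring
    rw [etot, e00, e10, e01, e11, e20, e21]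

-- ===== VERDICT (by name: the statement is the Claim_ definition above) =====
theorem f_spec : Claim_equal_f := by
  intro n a l _ hpre
  unfold Pre_f at hpre
  have hn : ((n.toNat : Nat) : Int) = n := Int.toNat_of_nonneg hpre
  show f n a l = f_alt n a l
  have halt : f_alt n a l = ((PySem.List.pyRange 0 n 1).foldl
      (fAltBody n (if a < 2 then 2 - a else 0) l)
      (1, 1, 1, 1, 1, 1, if n ≤ (if a < 2 then 2 - a else 0) then 1 else 0)).2.2.2.2.2.2 := rfl
  rw [show f n a l = fNat n.toNat a l from rfl, halt, ← hn, fAlt_loop]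
  simp only [Int.toNat_natCast]
  rw [fNat_decomp n.toNat a l]
  simp only [fCap]
  rfl
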